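-- pv_equiv track=rewrite | github.com/denizsincar29/irealstudio | chords.py | _pick_root_midi
-- ===== SOURCE A (Python) =====
-- _VOICE_ROOT_LOW  = 28   # E1
--
-- _VOICE_ROOT_HIGH = 46   # Bb2
--
-- def _pick_root_midi(root_pc: int, prev_root: int | None) -> int:
--     """Pick the MIDI note for the root with voice leading in [ROOT_LOW, ROOT_HIGH].
--
--     Selects the candidate in ``[_VOICE_ROOT_LOW, _VOICE_ROOT_HIGH]`` closest to
--     *prev_root* (to minimise octave jumps between chords).
--     """
--     candidates = [
--         n for n in range(_VOICE_ROOT_LOW, _VOICE_ROOT_HIGH + 1) if n % 12 == root_pc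
--     ]
--     if not candidates:
--         # Compute a fallback outside the range
--         n = _VOICE_ROOT_LOW
--         while n % 12 != root_pc:
--             n += 1
--         candidates = [n]
--
--     if prev_root is None:
--         return candidates[0]
--     return min(candidates, key=lambda x: abs(x - prev_root))
-- ===== SOURCE B (Python) =====
-- _VOICE_ROOT_LOW  = 28   # E1
--
-- _VOICE_ROOT_HIGH = 46   # Bb2
--
-- def _pick_root_midi(root_pc: int, prev_root: int | None) -> int:
--     """Closed-form selection: the lowest in-range root is
--     base = LOW + (root_pc - LOW) % 12; the only other in-range candidate is
--     base + 12 (when it fits).  Pick the one closer to prev_root, ties to base."""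
--     base = _VOICE_ROOT_LOW + (root_pc - _VOICE_ROOT_LOW) % 12
--     if prev_root is None:
--         return base
--     high = base + 12
--     if high <= _VOICE_ROOT_HIGH and abs(high - prev_root) < abs(base - prev_root):
--         return high
--     return base
-- ===== Notes on version B (the rewrite author's own statement) =====
-- stated objective: simpler
-- what changed: Replaces the range-scan list comprehension, while-loop fallback and min-with-key scan by a closed-form arithmetic choice between the two possible in-range candidates base and base+12.
import Mathlib
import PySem

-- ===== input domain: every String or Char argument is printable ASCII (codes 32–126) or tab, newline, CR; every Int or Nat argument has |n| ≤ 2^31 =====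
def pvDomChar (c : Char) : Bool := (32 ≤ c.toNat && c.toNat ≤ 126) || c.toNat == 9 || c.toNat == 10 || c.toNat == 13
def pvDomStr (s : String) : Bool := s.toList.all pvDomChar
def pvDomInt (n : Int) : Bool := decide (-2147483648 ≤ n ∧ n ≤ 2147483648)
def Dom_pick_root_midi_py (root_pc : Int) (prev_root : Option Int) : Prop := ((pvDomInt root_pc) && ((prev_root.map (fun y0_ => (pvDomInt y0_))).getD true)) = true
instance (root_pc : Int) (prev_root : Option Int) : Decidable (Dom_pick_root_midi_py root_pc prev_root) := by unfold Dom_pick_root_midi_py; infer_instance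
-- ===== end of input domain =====

-- B replaces A's range scan + min-with-key by a closed-form choice between base and base+12 (objective: simpler).

-- ===== PORT A =====
-- Python's `while n % 12 != root_pc: n += 1` ported with fuel; within Pre_ the
-- fallback branch is never reached (candidates are nonempty), and outside Pre_
-- the Python loop never terminates, so the fuel is never semantically relevant.
def pickRootFallbackLoop (root_pc : Int) : Nat → Int → Int
  | 0, n => n
  | fuel + 1, n => if PySem.Int.mod n 12 ≠ root_pc then pickRootFallbackLoop root_pc fuel (n + 1) else n

def pick_root_midi_py (root_pc : Int) (prev_root : Option Int) : Int :=
  let candidates := (PySem.List.pyRange 28 (46 + 1) 1).filter (fun n => PySem.Int.mod n 12 == root_pc)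
  let candidates := if candidates = [] then [pickRootFallbackLoop root_pc 12 28] else candidates
  match prev_root with
  | none => (PySem.List.pyGet? candidates 0).getD 0   -- candidates[0]; list is nonempty here
  | some p => (PySem.List.min? candidates (fun x => |x - p|)).getD 0

-- ===== PORT B =====
def pick_root_midi_py_alt (root_pc : Int) (prev_root : Option Int) : Int :=
  let base := 28 + PySem.Int.mod (root_pc - 28) 12
  match prev_root with
  | none => base
  | some p =>
    let high := base + 12
    if high ≤ 46 ∧ |high - p| < |base - p| then high else base

-- ===== PRECONDITION & SPEC =====
-- Pre_ excludes root_pc outside 0..11: there A's fallback while-loop never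
-- terminates (the Python call hangs and returns nothing).
def Pre_pick_root_midi_py (root_pc : Int) (prev_root : Option Int) : Prop :=
  0 ≤ root_pc ∧ root_pc < 12
instance (root_pc : Int) (prev_root : Option Int) : Decidable (Pre_pick_root_midi_py root_pc prev_root) := by unfold Pre_pick_root_midi_py; infer_instance
def pvWitness_pick_root_midi_py : Int × Option Int := (4, some 33)

def Spec_pick_root_midi_py (root_pc : Int) (prev_root : Option Int) (out : Int) : Prop := out = pick_root_midi_py_alt root_pc prev_root
instance (root_pc : Int) (prev_root : Option Int) (out : Int) : Decidable (Spec_pick_root_midi_py root_pc prev_root out) := by unfold Spec_pick_root_midi_py; infer_instance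

-- ===== CLAIM (what is proved, stated in full; the proofs are below) =====
def Claim_equal_pick_root_midi_py : Prop := ∀ (root_pc : Int) (prev_root : Option Int), Dom_pick_root_midi_py root_pc prev_root → Pre_pick_root_midi_py root_pc prev_root → Spec_pick_root_midi_py root_pc prev_root (pick_root_midi_py root_pc prev_root)

-- ===== LEMMAS AND PROOFS =====

-- ===== VERDICT (by name: the statement is the Claim_ definition above) =====
theorem pick_root_midi_py_spec : Claim_equal_pick_root_midi_py := by
  intro root_pc prev_root _ hpre
  obtain ⟨h0, h12⟩ := hpre
  unfold Spec_pick_root_midi_py pick_root_midi_py pick_root_midi_py_alt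
  rw [show PySem.List.pyRange 28 (46 + 1) 1 =
        [28, 29, 30, 31, 32, 33, 34, 35, 36, 37, 38, 39, 40, 41, 42, 43, 44, 45, 46] from by decide]
  interval_cases root_pc <;>
    rcases prev_root with _ | p <;>
    simp [PySem.Int.mod, PySem.List.min?, PySem.List.pyGet?, PySem.List.pyIdx?] <;>
    split_ifs <;> simp
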